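-- pv_equiv track=rewrite | github.com/Sfgangloff/webpage-sorting | strings_functions.py | tagid
-- ===== SOURCE A (Python) =====
-- def tagid(s):
--     l=len(s)
--     j=0
--     c=0
--     try:
--         while c==0:
--             if s[j].isalpha():
--                 c=1
--             else:
--                 j=j+1
--         c=0
--         k=j+1
--         while c==0:
--             if s[k].isalpha():
--                 k=k+1
--             else:
--                 c=1
--         w=s[j:k]
--     except:
--         w=""
--     return w
-- ===== SOURCE B (Python) =====
-- def tagid(s):
--     # One accumulator pass: collect the first alphabetic run; emit it only when a
--     # non-alphabetic terminator follows it (a run reaching end-of-string yields '',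
--     # as does a string with no alphabetic character).
--     run = []
--     for ch in s:
--         if ch.isalpha():
--             run.append(ch)
--         elif run:
--             return ''.join(run)
--     return ''
-- ===== Notes on version B (the rewrite author's own statement) =====
-- stated objective: simpler
-- what changed: Two index-driven while loops under a try/except (find the start, scan for the end, then slice) are replaced by a single accumulator pass iterating directly over the characters (no per-step indexing), collecting the first alphabetic run and returning it only when a non-alphabetic terminator is reached ('' otherwise, which reproduces A's caught-IndexError result for a run reaching end-of-string).
import Mathlib
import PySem

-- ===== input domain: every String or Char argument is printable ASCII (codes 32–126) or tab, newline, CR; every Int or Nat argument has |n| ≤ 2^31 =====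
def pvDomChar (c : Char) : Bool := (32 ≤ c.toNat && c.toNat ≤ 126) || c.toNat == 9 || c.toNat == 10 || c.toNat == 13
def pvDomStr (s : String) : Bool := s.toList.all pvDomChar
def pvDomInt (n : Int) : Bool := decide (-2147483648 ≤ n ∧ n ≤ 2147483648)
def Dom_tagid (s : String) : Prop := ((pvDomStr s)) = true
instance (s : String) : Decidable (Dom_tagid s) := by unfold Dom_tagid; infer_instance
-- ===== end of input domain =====

-- B replaces A's two index-driven while loops + try/except + slice by one accumulator
-- pass that collects the first alphabetic run and returns it only when a non-alphabetic
-- terminator follows it (objective: simpler).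

-- ===== PORT A =====
-- first while loop: advance j until s[j].isalpha(); none = IndexError (caught below)
def tagidFind (cs : List Char) (j : Nat) : Option Nat :=
  if h : j < cs.length then
    if PySem.Chars.isalpha cs[j] then some j else tagidFind cs (j + 1)
  else none
termination_by cs.length - j

-- second while loop: advance k while s[k].isalpha(); none = IndexError (caught below)
def tagidScan (cs : List Char) (k : Nat) : Option Nat :=
  if h : k < cs.length then
    if PySem.Chars.isalpha cs[k] then tagidScan cs (k + 1) else some k
  else none
termination_by cs.length - k

def tagid (s : String) : String :=
  let cs := s.toList
  match tagidFind cs 0 with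
  | none => ""                 -- except: w = ""
  | some j =>
    match tagidScan cs (j + 1) with
    | none => ""               -- except: w = ""
    | some k => String.ofList (PySem.List.slice cs (some (j : Int)) (some (k : Int)))  -- w = s[j:k]

-- ===== PORT B =====
def tagidAltLoop (cs : List Char) (run : List Char) : List Char :=
  match cs with
  | [] => []                               -- fell off the loop: return ''
  | c :: rest =>
    if PySem.Chars.isalpha c then tagidAltLoop rest (run ++ [c])
    else if !run.isEmpty then run          -- break
    else tagidAltLoop rest run

def tagid_alt (s : String) : String := String.ofList (tagidAltLoop s.toList [])

-- ===== PRECONDITION & SPEC =====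
def Spec_tagid (s : String) (out : String) : Prop := out = tagid_alt s
instance (s : String) (out : String) : Decidable (Spec_tagid s out) := by unfold Spec_tagid; infer_instance

-- ===== CLAIM (what is proved, stated in full; the proofs are below) =====
def Claim_equal_tagid : Prop := ∀ (s : String), Dom_tagid s → Spec_tagid s (tagid s)

-- ===== LEMMAS AND PROOFS =====

lemma tagidFind_eq (cs : List Char) (j : Nat) :
    tagidFind cs j =
      if (cs.drop j).dropWhile (fun c => !PySem.Chars.isalpha c) = [] then none
      else some (j + ((cs.drop j).takeWhile (fun c => !PySem.Chars.isalpha c)).length) := by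
  induction j using tagidFind.induct cs with
  | case1 j h halpha =>
    rw [tagidFind]
    simp only [dif_pos h, if_pos halpha]
    rw [List.drop_eq_getElem_cons h, List.dropWhile_cons, List.takeWhile_cons]
    simp [halpha]
    exact h
  | case2 j h halpha ih =>
    rw [tagidFind]
    simp only [dif_pos h, if_neg halpha]
    rw [ih, List.drop_eq_getElem_cons h]
    simp only [Bool.not_eq_true] at halpha
    simp only [List.dropWhile_cons, List.takeWhile_cons, halpha, Bool.not_false, if_true]
    split <;> simp <;> omega
  | case3 j h =>
    have hd : cs.drop j = [] := List.drop_eq_nil_iff.mpr (by omega)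
    rw [tagidFind]
    simp [h, hd]

lemma tagidScan_eq (cs : List Char) (k : Nat) :
    tagidScan cs k =
      if (cs.drop k).all PySem.Chars.isalpha then none
      else some (k + ((cs.drop k).takeWhile PySem.Chars.isalpha).length) := by
  induction k using tagidScan.induct cs with
  | case1 k h halpha ih =>
    rw [tagidScan]
    simp only [dif_pos h, if_pos halpha]
    rw [ih, List.drop_eq_getElem_cons h]
    simp only [List.all_cons, List.takeWhile_cons, halpha, Bool.true_and, if_true]
    split <;> simp <;> omega
  | case2 k h halpha =>
    rw [tagidScan]
    simp only [dif_pos h, if_neg halpha]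
    rw [List.drop_eq_getElem_cons h, List.all_cons, List.takeWhile_cons]
    simp only [Bool.not_eq_true] at halpha
    simp [halpha]
  | case3 k h =>
    have hd : cs.drop k = [] := List.drop_eq_nil_iff.mpr (by omega)
    rw [tagidScan]
    simp [h, hd]

lemma altLoop_skip (t u : List Char) (h : ∀ c ∈ t, PySem.Chars.isalpha c = false) :
    tagidAltLoop (t ++ u) [] = tagidAltLoop u [] := by
  induction t with
  | nil => simp
  | cons c rest ih =>
    rw [List.cons_append, tagidAltLoop]
    simp [h c List.mem_cons_self]
    exact ih (fun x hx => h x (List.mem_cons_of_mem _ hx))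

lemma altLoop_run (t run : List Char) (h : run ≠ []) :
    tagidAltLoop t run =
      if t.all PySem.Chars.isalpha then []
      else run ++ t.takeWhile PySem.Chars.isalpha := by
  induction t generalizing run with
  | nil => simp [tagidAltLoop]
  | cons c rest ih =>
    rw [tagidAltLoop, List.all_cons, List.takeWhile_cons]
    by_cases hc : PySem.Chars.isalpha c
    · simp only [hc, if_true, Bool.true_and]
      rw [ih _ (by simp)]
      split <;> simp
    · simp only [Bool.not_eq_true] at hc
      simp [hc, h]

lemma drop_len_takeWhile (p : Char → Bool) (l : List Char) :
    l.drop (l.takeWhile p).length = l.dropWhile p := by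
  calc l.drop (l.takeWhile p).length
      = (l.takeWhile p ++ l.dropWhile p).drop (l.takeWhile p).length := by
        rw [List.takeWhile_append_dropWhile]
    _ = l.dropWhile p := List.drop_left

lemma take_len_takeWhile (p : Char → Bool) (l : List Char) :
    l.take (l.takeWhile p).length = l.takeWhile p :=
  ((List.prefix_iff_eq_take).1 (List.takeWhile_prefix p)).symm

lemma dropWhile_head_false {q : Char → Bool} (l : List Char) {c : Char} {rest : List Char}
    (h : l.dropWhile q = c :: rest) : q c = false := by
  induction l with
  | nil => simp at h
  | cons a t ih =>
    rw [List.dropWhile_cons] at h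
    by_cases ha : q a = true
    · exact ih (by simpa [ha] using h)
    · simp only [Bool.not_eq_true] at ha
      simp only [ha, Bool.false_eq_true, if_false] at h
      injection h with h1 h2
      subst h1
      exact ha

lemma main_lemma (s : String) : tagid s = tagid_alt s := by
  cases hsplit : s.toList.dropWhile (fun c => !PySem.Chars.isalpha c) with
  | nil =>
    have hf : tagidFind s.toList 0 = none := by
      rw [tagidFind_eq]; simp [hsplit]
    have hb : tagidAltLoop s.toList [] = [] := by
      conv_lhs =>
        rw [← List.takeWhile_append_dropWhile
              (p := fun c => !PySem.Chars.isalpha c) (l := s.toList), hsplit]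
      rw [altLoop_skip _ _ (fun x hx => by
        have := List.mem_takeWhile_imp hx; simpa using this)]
      rfl
    simp [tagid, tagid_alt, hf, hb]
  | cons c rest =>
    have hc : PySem.Chars.isalpha c = true := by
      have := dropWhile_head_false _ hsplit; simpa using this
    have hdropj :
        s.toList.drop ((s.toList.takeWhile (fun c => !PySem.Chars.isalpha c)).length)
          = c :: rest := by rw [drop_len_takeWhile, hsplit]
    have hfind : tagidFind s.toList 0 =
        some ((s.toList.takeWhile (fun c => !PySem.Chars.isalpha c)).length) := by
      rw [tagidFind_eq]; simp [hsplit]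
    have hdropj1 :
        s.toList.drop ((s.toList.takeWhile (fun c => !PySem.Chars.isalpha c)).length + 1)
          = rest := by
      have h1 := congrArg (List.drop 1) hdropj
      simpa [List.drop_drop, Nat.add_comm] using h1
    have hB : tagidAltLoop s.toList [] =
        if rest.all PySem.Chars.isalpha then []
        else c :: rest.takeWhile PySem.Chars.isalpha := by
      conv_lhs =>
        rw [← List.takeWhile_append_dropWhile
              (p := fun c => !PySem.Chars.isalpha c) (l := s.toList), hsplit]
      rw [altLoop_skip _ _ (fun x hx => by
        have := List.mem_takeWhile_imp hx; simpa using this)]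
      rw [tagidAltLoop]
      simp only [hc, if_true]
      rw [altLoop_run _ _ (by simp)]
      rfl
    by_cases hall : rest.all PySem.Chars.isalpha = true
    · have hscan : tagidScan s.toList
          ((s.toList.takeWhile (fun c => !PySem.Chars.isalpha c)).length + 1) = none := by
        rw [tagidScan_eq, hdropj1, hall]; simp
      simp [tagid, tagid_alt, hfind, hscan, hB, hall]
    · have hall' : rest.all PySem.Chars.isalpha = false := by simpa using hall
      have hscan : tagidScan s.toList
          ((s.toList.takeWhile (fun c => !PySem.Chars.isalpha c)).length + 1) =
          some ((s.toList.takeWhile (fun c => !PySem.Chars.isalpha c)).length + 1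
                + (rest.takeWhile PySem.Chars.isalpha).length) := by
        rw [tagidScan_eq, hdropj1, hall']; simp
      have hslice : PySem.List.slice s.toList
          (some ((s.toList.takeWhile (fun c => !PySem.Chars.isalpha c)).length : Int))
          (some (((s.toList.takeWhile (fun c => !PySem.Chars.isalpha c)).length + 1
                + (rest.takeWhile PySem.Chars.isalpha).length : Nat) : Int))
          = c :: rest.takeWhile PySem.Chars.isalpha := by
        rw [PySem.List.slice_natCast, hdropj]
        rw [show ((s.toList.takeWhile (fun c => !PySem.Chars.isalpha c)).length + 1
              + (rest.takeWhile PySem.Chars.isalpha).length)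
              - (s.toList.takeWhile (fun c => !PySem.Chars.isalpha c)).length
              = (rest.takeWhile PySem.Chars.isalpha).length + 1 by omega]
        rw [List.take_succ_cons, take_len_takeWhile]
      simp only [tagid, tagid_alt, hfind, hscan, hB, hall', Bool.false_eq_true, if_false]
      rw [hslice]

-- ===== VERDICT =====
theorem tagid_spec : Claim_equal_tagid := by
  intro s _
  exact main_lemma s
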